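-- pv_equiv track=rewrite | github.com/leoCottret/cbn-leocottret-mods | GAME_TOOLS/VEHICLE_CREATION_HELPER/Attic/Back_Up/text_recognition_poc.py | too_many_misplaced_characters
-- ===== SOURCE A (Python) =====
-- def too_many_misplaced_characters(text, subline, max_diff_allowed):
-- 	misplaced_character_count = 0
-- 	for i in range(len(text)):
-- 		character_found:bool = False
-- 		for j in range(-max_diff_allowed, max_diff_allowed):
-- 			# We skip any values out of range, in the text string
-- 			if i+j < 0 or i+j>len(text)-1 or i+j>len(subline)-1:
-- 				continue
-- 			if text[i] == subline[i+j]: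
-- 				character_found = True
--
-- 		if not character_found:
-- 			misplaced_character_count += 1
--
-- 	# We don't want a string with similar letter frequency but too many misplaced character, it's probably a word close to a anagram
-- 	# If half of the letters are misplaced, we don't want it
-- 	return (misplaced_character_count >= len(text)/2)
-- ===== SOURCE B (Python) =====
-- def too_many_misplaced_characters(text, subline, max_diff_allowed):
--     # Sliding-window character-count map over subline: each subline position is
--     # added/removed at most once, so the whole scan is O(len(text)+len(subline))
--     # instead of A's O(len(text)*max_diff_allowed).
--     n = len(text)
--     m = max_diff_allowed
--     hi = min(n, len(subline)) - 1  # rightmost subline index A ever compares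
--     counts = {}
--     L, R = 0, -1                   # counts holds the characters subline[L..R]
--     misplaced = 0
--     for i in range(n):
--         R2 = max(R, min(i + m - 1, hi))
--         for k in range(R + 1, R2 + 1):
--             c = subline[k]
--             counts[c] = counts.get(c, 0) + 1
--         L2 = min(max(L, max(0, i - m)), R2 + 1)
--         for k in range(L, L2):
--             counts[subline[k]] -= 1
--         L, R = L2, R2
--         if counts.get(text[i], 0) <= 0:
--             misplaced += 1
--     return 2 * misplaced >= n
-- ===== Notes on version B (the rewrite author's own statement) =====
-- stated objective: faster
-- what changed: Replaced A's per-position rescan of the +/-max_diff window of subline by a sliding-window character-count dictionary in which each subline position is added and removed at most once, making the membership test O(1) per text position.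
import Mathlib
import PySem

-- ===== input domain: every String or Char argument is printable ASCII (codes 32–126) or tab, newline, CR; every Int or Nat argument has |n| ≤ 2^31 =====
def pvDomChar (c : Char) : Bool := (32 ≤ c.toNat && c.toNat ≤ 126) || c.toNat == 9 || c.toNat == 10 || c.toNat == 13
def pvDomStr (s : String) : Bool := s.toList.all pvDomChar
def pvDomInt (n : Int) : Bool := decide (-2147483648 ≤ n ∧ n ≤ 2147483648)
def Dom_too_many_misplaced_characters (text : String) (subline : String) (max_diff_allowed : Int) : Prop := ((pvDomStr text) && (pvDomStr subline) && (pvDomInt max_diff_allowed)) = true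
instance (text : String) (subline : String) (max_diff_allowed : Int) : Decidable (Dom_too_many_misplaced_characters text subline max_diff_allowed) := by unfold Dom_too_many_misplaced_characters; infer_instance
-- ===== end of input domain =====

-- B replaces A's per-position rescan of a ±max_diff window by a sliding-window
-- character-count dictionary over subline (each subline position enters/leaves the
-- window once), keeping the exact same result; objective: faster (asymptotic).

-- ===== PORT A =====
-- literal transliteration of A; Python's `count >= len(text)/2` on these ints is exactly `2*count ≥ len`
def too_many_misplaced_characters (text : String) (subline : String) (max_diff_allowed : Int) : Bool :=
  let t := text.toList
  let s := subline.toList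
  let mis : Int := (PySem.List.pyRange 0 (t.length : Int) 1).foldl (fun mis i =>
    let found := (PySem.List.pyRange (-max_diff_allowed) max_diff_allowed 1).foldl (fun f j =>
      if i + j < 0 ∨ i + j > (t.length : Int) - 1 ∨ i + j > (s.length : Int) - 1 then f
      else if PySem.List.pyGet? t i = PySem.List.pyGet? s (i + j) then true else f) false
    if !found then mis + 1 else mis) 0
  decide (2 * mis ≥ (t.length : Int))

-- ===== PORT B =====
-- literal transliteration of Source B; subline[k]/text[i] are always in range where read,
-- so pyGetD's default is never used
def too_many_misplaced_characters_alt (text : String) (subline : String) (max_diff_allowed : Int) : Bool :=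
  let t := text.toList
  let s := subline.toList
  let n : Int := t.length
  let hi : Int := min n (s.length : Int) - 1
  let st := (PySem.List.pyRange 0 n 1).foldl (fun st i =>
    match st with
    | (d, L, R, mis) =>
      let R2 := max R (min (i + max_diff_allowed - 1) hi)
      let d1 := (PySem.List.pyRange (R + 1) (R2 + 1) 1).foldl
        (fun d k => d.modify (PySem.List.pyGetD s k ' ') 0 (· + 1)) d
      let L2 := min (max L (max 0 (i - max_diff_allowed))) (R2 + 1)
      let d2 := (PySem.List.pyRange L L2 1).foldl
        (fun d k => d.modify (PySem.List.pyGetD s k ' ') 0 (· - 1)) d1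
      let mis' := if d2.getD (PySem.List.pyGetD t i ' ') 0 ≤ 0 then mis + 1 else mis
      ((d2, L2, R2, mis') : PySem.Dict Char Int × Int × Int × Int))
    ((PySem.Dict.empty, 0, -1, 0) : PySem.Dict Char Int × Int × Int × Int)
  decide (2 * st.2.2.2 ≥ n)

-- ===== PRECONDITION & SPEC =====
def Spec_too_many_misplaced_characters (text : String) (subline : String) (max_diff_allowed : Int) (out : Bool) : Prop := out = too_many_misplaced_characters_alt text subline max_diff_allowed
instance (text : String) (subline : String) (max_diff_allowed : Int) (out : Bool) : Decidable (Spec_too_many_misplaced_characters text subline max_diff_allowed out) := by unfold Spec_too_many_misplaced_characters; infer_instance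

-- ===== CLAIM (what is proved, stated in full; the proofs are below) =====
def Claim_equal_too_many_misplaced_characters : Prop := ∀ (text : String) (subline : String) (max_diff_allowed : Int), Dom_too_many_misplaced_characters text subline max_diff_allowed → Spec_too_many_misplaced_characters text subline max_diff_allowed (too_many_misplaced_characters text subline max_diff_allowed)

-- ===== LEMMAS AND PROOFS =====

-- `found` of position i, as a window membership test (the common spec of both loops)
def pvFound (t s : List Char) (m hi i : Int) : Bool :=
  ((PySem.List.pyRange (max 0 (i - m)) (min (i + m - 1) hi + 1) 1).map
    (fun k => PySem.List.pyGetD s k ' ')).contains (PySem.List.pyGetD t i ' ')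

-- closed forms of B's window ends after p iterations
def pvR (m hi : Int) : Nat → Int
  | 0 => -1
  | p + 1 => max (pvR m hi p) (min ((p : Int) + m - 1) hi)

def pvL (m hi : Int) : Nat → Int
  | 0 => 0
  | p + 1 => min (max (pvL m hi p) (max 0 ((p : Int) - m))) (pvR m hi (p + 1) + 1)

lemma pvR_eq (m hi : Int) (p : Nat) :
    pvR m hi (p + 1) = max (-1) (min ((p : Int) + m - 1) hi) := by
  induction p with
  | zero => simp [pvR]
  | succ q ih =>
      show max (pvR m hi (q + 1)) _ = _
      rw [ih]; push_cast; omega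

lemma pvL_le (m hi : Int) (p : Nat) : pvL m hi p ≤ max 0 ((p : Int) - m) ∧ 0 ≤ pvL m hi p := by
  induction p with
  | zero => simp [pvL]
  | succ q ih =>
      constructor
      · calc pvL m hi (q + 1) ≤ max (pvL m hi q) (max 0 ((q : Int) - m)) := min_le_left _ _
          _ ≤ max 0 ((q : Int) - m) := by omega
          _ ≤ max 0 (((q : Nat) + 1 : Int) - m) := by omega
      · have h2 : (0:Int) ≤ max (pvL m hi q) (max 0 ((q : Int) - m)) := by omega
        have h3 := pvR_eq m hi q
        have : (-1:Int) ≤ pvR m hi (q+1) := by rw [h3]; omega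
        show (0:Int) ≤ min _ _
        omega

lemma pvL_eq (m hi : Int) (p : Nat) :
    pvL m hi (p + 1) = min (max 0 ((p : Int) - m)) (pvR m hi (p + 1) + 1) := by
  have h := (pvL_le m hi p).1
  show min (max (pvL m hi p) (max 0 ((p : Int) - m))) _ = _
  omega

lemma pvL_le_pvR_succ (m hi : Int) (p : Nat) : pvL m hi p ≤ pvR m hi p + 1 := by
  cases p with
  | zero => simp [pvL, pvR]
  | succ q => exact min_le_right _ _

lemma pvR_mono (m hi : Int) (p : Nat) : pvR m hi p ≤ pvR m hi (p + 1) := le_max_left _ _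

lemma pvL_mono (m hi : Int) (p : Nat) : pvL m hi p ≤ pvL m hi (p + 1) := by
  have h1 := pvL_le_pvR_succ m hi p
  have h2 := pvR_mono m hi p
  show pvL m hi p ≤ min (max (pvL m hi p) _) _
  omega

-- getD after a decrement loop (the subtraction twin of getD_foldl_modify_add_one)
lemma getD_foldl_modify_sub_one (l : List Char) (d : PySem.Dict Char Int) (v : Char) :
    (l.foldl (fun d x => d.modify x 0 (· - 1)) d).getD v 0 = d.getD v 0 - l.count v := by
  induction l generalizing d with
  | nil => simp
  | cons x xs ih =>
      simp only [List.foldl_cons, ih, PySem.Dict.getD_modify, List.count_cons]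
      by_cases h : v = x
      · subst h; simp; omega
      · have : (x == v) = false := by simp [Ne.symm h]
        simp [h, this]

-- the character count of a window of subline, as held by B's dictionary
def pvWin (s : List Char) (a b : Int) (c : Char) : Nat :=
  ((PySem.List.pyRange a b 1).map (fun k => PySem.List.pyGetD s k ' ')).count c

lemma pvWin_split (s : List Char) (a b c : Int) (h1 : a ≤ b) (h2 : b ≤ c) (ch : Char) :
    pvWin s a c ch = pvWin s a b ch + pvWin s b c ch := by
  unfold pvWin
  rw [PySem.List.pyRange_one_append a b c h1 h2, List.map_append, List.count_append]

-- the shape of A's inner loop, kept generic so the tests stay opaque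
lemma pv_foldl_found (l : List Int) (cond : Int → Prop) [DecidablePred cond]
    (eq : Int → Prop) [DecidablePred eq] (b : Bool) :
    l.foldl (fun f j => if cond j then f else if eq j then true else f) b
    = (b || l.any (fun j => !decide (cond j) && decide (eq j))) := by
  induction l generalizing b with
  | nil => simp
  | cons x xs ih =>
      simp only [List.foldl_cons, List.any_cons, ih]
      by_cases h1 : cond x <;> by_cases h2 : eq x <;> simp [h1, h2]

lemma pyGet?_eq_some_pyGetD (xs : List Char) (i : Int) (h0 : 0 ≤ i) (h1 : i < (xs.length : Int)) :
    PySem.List.pyGet? xs i = some (PySem.List.pyGetD xs i ' ') := by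
  rw [PySem.List.pyGet?_eq_some_getElem xs h0 h1, PySem.List.pyGetD_eq_getElem xs ' ' h0 h1]

-- A's inner loop computes pvFound
lemma innerA (t s : List Char) (m i : Int) (h0 : 0 ≤ i) (h1 : i < (t.length : Int)) :
    ((PySem.List.pyRange (-m) m 1).foldl (fun f j =>
      if i + j < 0 ∨ i + j > (t.length : Int) - 1 ∨ i + j > (s.length : Int) - 1 then f
      else if PySem.List.pyGet? t i = PySem.List.pyGet? s (i + j) then true else f) false)
    = pvFound t s m (min (t.length : Int) (s.length : Int) - 1) i := by
  rw [pv_foldl_found (cond := fun j => i + j < 0 ∨ i + j > (t.length : Int) - 1 ∨ i + j > (s.length : Int) - 1)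
        (eq := fun j => PySem.List.pyGet? t i = PySem.List.pyGet? s (i + j))]
  rw [Bool.false_or, Bool.eq_iff_iff]
  unfold pvFound
  simp only [List.any_eq_true, PySem.List.mem_pyRange_one, List.contains_eq_mem,
    decide_eq_true_eq, List.mem_map, Bool.and_eq_true, Bool.not_eq_true',
    decide_eq_false_iff_not, not_or, not_lt]
  constructor
  · rintro ⟨j, ⟨hj1, hj2⟩, ⟨hg1, hg2, hg3⟩, heq⟩
    refine ⟨i + j, ⟨by omega, by omega⟩, ?_⟩
    rw [pyGet?_eq_some_pyGetD t i h0 h1,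
        pyGet?_eq_some_pyGetD s (i + j) (by omega) (by omega)] at heq
    exact (Option.some_inj.mp heq).symm
  · rintro ⟨k, ⟨hk1, hk2⟩, heq⟩
    refine ⟨k - i, ⟨by omega, by omega⟩, ⟨by omega, by omega, by omega⟩, ?_⟩
    have hik : i + (k - i) = k := by ring
    rw [hik, pyGet?_eq_some_pyGetD t i h0 h1,
        pyGet?_eq_some_pyGetD s k (by omega) (by omega)]
    exact congrArg some heq.symm

-- B's actual window equals the ideal window of position p (possibly both empty)
lemma pvWin_eq_ideal (s : List Char) (m hi : Int) (p : Nat) (c : Char) :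
    pvWin s (pvL m hi (p + 1)) (pvR m hi (p + 1) + 1) c
    = pvWin s (max 0 ((p : Int) - m)) (min ((p : Int) + m - 1) hi + 1) c := by
  have hL := pvL_eq m hi p
  have hR := pvR_eq m hi p
  by_cases h : max 0 ((p : Int) - m) ≤ min ((p : Int) + m - 1) hi
  · have e1 : pvR m hi (p + 1) = min ((p : Int) + m - 1) hi := by omega
    have e2 : pvL m hi (p + 1) = max 0 ((p : Int) - m) := by omega
    rw [e1, e2]
  · unfold pvWin
    rw [PySem.List.pyRange_one_eq_nil (a := pvL m hi (p + 1)) (by omega),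
        PySem.List.pyRange_one_eq_nil (by omega)]

-- B's fold state after p iterations
lemma foldB (t s : List Char) (m : Int) (p : Nat) (hp : p ≤ t.length) :
    ∃ d : PySem.Dict Char Int,
      ((PySem.List.pyRange 0 (p : Int) 1).foldl (fun st i =>
        match st with
        | (d, L, R, mis) =>
          let hi : Int := min (t.length : Int) (s.length : Int) - 1
          let R2 := max R (min (i + m - 1) hi)
          let d1 := (PySem.List.pyRange (R + 1) (R2 + 1) 1).foldl
            (fun d k => d.modify (PySem.List.pyGetD s k ' ') 0 (· + 1)) d
          let L2 := min (max L (max 0 (i - m))) (R2 + 1)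
          let d2 := (PySem.List.pyRange L L2 1).foldl
            (fun d k => d.modify (PySem.List.pyGetD s k ' ') 0 (· - 1)) d1
          let mis' := if d2.getD (PySem.List.pyGetD t i ' ') 0 ≤ 0 then mis + 1 else mis
          ((d2, L2, R2, mis') : PySem.Dict Char Int × Int × Int × Int))
        ((PySem.Dict.empty, 0, -1, 0) : PySem.Dict Char Int × Int × Int × Int))
      = (d, pvL m (min (t.length : Int) (s.length : Int) - 1) p,
            pvR m (min (t.length : Int) (s.length : Int) - 1) p,
            ((PySem.List.pyRange 0 (p : Int) 1).countP
              (fun i => !pvFound t s m (min (t.length : Int) (s.length : Int) - 1) i) : Int))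
      ∧ ∀ c : Char, d.getD c 0 =
          (pvWin s (pvL m (min (t.length : Int) (s.length : Int) - 1) p)
                   (pvR m (min (t.length : Int) (s.length : Int) - 1) p + 1) c : Int) := by
  set hi : Int := min (t.length : Int) (s.length : Int) - 1 with hhi
  induction p with
  | zero =>
      refine ⟨PySem.Dict.empty, ?_, ?_⟩
      · simp [PySem.List.pyRange_one_eq_nil (by omega : (0:Int) ≤ 0), pvL, pvR]
      · intro c
        simp [pvWin, pvL, pvR, PySem.List.pyRange_one_eq_nil (by omega : (0:Int) ≤ 0)]
  | succ q ih =>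
      obtain ⟨d, hfold, hgetD⟩ := ih (by omega)
      have hq : ((q + 1 : Nat) : Int) = (q : Int) + 1 := by push_cast; ring
      rw [hq, PySem.List.pyRange_one_succ_right (by omega : (0:Int) ≤ (q:Int)),
          List.foldl_append, hfold, List.foldl_cons, List.foldl_nil]
      -- names for the step's quantities
      have hR2 : max (pvR m hi q) (min ((q : Int) + m - 1) hi) = pvR m hi (q + 1) := rfl
      have hL2 : min (max (pvL m hi q) (max 0 ((q : Int) - m))) (pvR m hi (q + 1) + 1)
          = pvL m hi (q + 1) := rfl
      simp only [hR2, hL2]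
      -- the two inner modify-loops, as counts
      have hadd : ∀ (d0 : PySem.Dict Char Int) (a b : Int) (c : Char),
          ((PySem.List.pyRange a b 1).foldl
            (fun d k => d.modify (PySem.List.pyGetD s k ' ') 0 (· + 1)) d0).getD c 0
          = d0.getD c 0 + (pvWin s a b c : Int) := by
        intro d0 a b c
        have h := PySem.Dict.getD_foldl_modify_add_one
          ((PySem.List.pyRange a b 1).map (fun k => PySem.List.pyGetD s k ' ')) d0 c
        rw [List.foldl_map] at h
        exact h
      have hsub : ∀ (d0 : PySem.Dict Char Int) (a b : Int) (c : Char),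
          ((PySem.List.pyRange a b 1).foldl
            (fun d k => d.modify (PySem.List.pyGetD s k ' ') 0 (· - 1)) d0).getD c 0
          = d0.getD c 0 - (pvWin s a b c : Int) := by
        intro d0 a b c
        have h := getD_foldl_modify_sub_one
          ((PySem.List.pyRange a b 1).map (fun k => PySem.List.pyGetD s k ' ')) d0 c
        rw [List.foldl_map] at h
        exact h
      have hd2 : ∀ c : Char,
          (((PySem.List.pyRange (pvL m hi q) (pvL m hi (q + 1)) 1).foldl
            (fun d k => d.modify (PySem.List.pyGetD s k ' ') 0 (· - 1))
            ((PySem.List.pyRange (pvR m hi q + 1) (pvR m hi (q + 1) + 1) 1).foldl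
              (fun d k => d.modify (PySem.List.pyGetD s k ' ') 0 (· + 1)) d)).getD c 0)
          = (pvWin s (pvL m hi (q + 1)) (pvR m hi (q + 1) + 1) c : Int) := by
        intro c
        rw [hsub, hadd, hgetD]
        have h1 : pvL m hi q ≤ pvR m hi q + 1 := pvL_le_pvR_succ m hi q
        have h2 : pvR m hi q + 1 ≤ pvR m hi (q + 1) + 1 := by
          have := pvR_mono m hi q; omega
        have h3 : pvL m hi q ≤ pvL m hi (q + 1) := pvL_mono m hi q
        have h4 : pvL m hi (q + 1) ≤ pvR m hi (q + 1) + 1 := pvL_le_pvR_succ m hi (q + 1)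
        have e1 := pvWin_split s (pvL m hi q) (pvR m hi q + 1) (pvR m hi (q + 1) + 1) h1 h2 c
        have e2 := pvWin_split s (pvL m hi q) (pvL m hi (q + 1)) (pvR m hi (q + 1) + 1) h3 h4 c
        omega
      -- the conditional equals the pvFound test
      have hcond : (((PySem.List.pyRange (pvL m hi q) (pvL m hi (q + 1)) 1).foldl
            (fun d k => d.modify (PySem.List.pyGetD s k ' ') 0 (· - 1))
            ((PySem.List.pyRange (pvR m hi q + 1) (pvR m hi (q + 1) + 1) 1).foldl
              (fun d k => d.modify (PySem.List.pyGetD s k ' ') 0 (· + 1)) d)).getD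
            (PySem.List.pyGetD t (q : Int) ' ') 0 ≤ 0)
          ↔ pvFound t s m hi (q : Int) = false := by
        rw [hd2, pvWin_eq_ideal]
        unfold pvFound pvWin
        rw [List.contains_eq_mem]
        constructor
        · intro h
          have : List.count (PySem.List.pyGetD t (q : Int) ' ')
              ((PySem.List.pyRange (max 0 ((q : Int) - m)) (min ((q : Int) + m - 1) hi + 1) 1).map
                (fun k => PySem.List.pyGetD s k ' ')) = 0 := by omega
          rw [List.count_eq_zero] at this
          simp only [decide_eq_false_iff_not]
          exact this
        · intro h
          simp only [decide_eq_false_iff_not] at h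
          rw [← List.count_eq_zero] at h
          omega
      refine ⟨_, ?_, hd2⟩
      rw [List.countP_append]
      by_cases hf : pvFound t s m hi (q : Int) = false
      · rw [if_pos (hcond.mpr hf)]
        simp [hf]
      · rw [if_neg (fun hc => hf (hcond.mp hc))]
        have hf' : pvFound t s m hi (q : Int) = true := by
          cases hb : pvFound t s m hi (q : Int)
          · exact absurd hb hf
          · rfl
        simp [hf']

-- ===== VERDICT (by name: the statement is the Claim_ definition above) =====
theorem too_many_misplaced_characters_spec : Claim_equal_too_many_misplaced_characters := by
  intro text subline m _
  unfold Spec_too_many_misplaced_characters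
  unfold too_many_misplaced_characters too_many_misplaced_characters_alt
  set t := text.toList
  set s := subline.toList
  obtain ⟨d, hfold, _⟩ := foldB t s m t.length le_rfl
  simp only []
  rw [hfold]
  have hA : (PySem.List.pyRange 0 (t.length : Int) 1).foldl (fun mis i =>
      if !((PySem.List.pyRange (-m) m 1).foldl (fun f j =>
        if i + j < 0 ∨ i + j > (t.length : Int) - 1 ∨ i + j > (s.length : Int) - 1 then f
        else if PySem.List.pyGet? t i = PySem.List.pyGet? s (i + j) then true else f) false)
      then mis + 1 else mis) (0 : Int)
      = ((PySem.List.pyRange 0 (t.length : Int) 1).countP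
          (fun i => !pvFound t s m (min (t.length : Int) (s.length : Int) - 1) i) : Int) := by
    rw [PySem.List.foldl_congr_mem _ _
        (fun mis i => if !pvFound t s m (min (t.length : Int) (s.length : Int) - 1) i
          then mis + 1 else mis) 0
        (by
          intro acc i hi
          rw [PySem.List.mem_pyRange_one] at hi
          rw [innerA t s m i hi.1 hi.2])]
    rw [PySem.List.foldl_if_add_one]
    ring
  rw [hA]
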